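-- pv_equiv track=rewrite | github.com/Mooov2/jupiter-hell-purgatory-map | jh.py | name2seq
-- ===== SOURCE A (Python) =====
-- codes = ["U","R","D","L"]
--
-- def name2seq(u,length):
--     u=u.lower().strip().replace(" ", "")[:length]
--     prev=(ord(u.lower().strip()[0])-ord('a'))//7
--     out=[codes[prev]]
--     for letter in u.lower().strip()[1:]:
--         prev=(prev+(ord(letter)-ord('a'))//9+3)%4
--         out.append(codes[prev])
--     return out
-- ===== SOURCE B (Python) =====
-- ROT = {"U": "R", "R": "D", "D": "L", "L": "U"}
--
-- def _step(d, c):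
--     # advance the direction symbol by rotating it the letter's quarter-turn count
--     for _ in range(((ord(c) - ord('a')) // 9 + 3) % 4):
--         d = ROT[d]
--     return d
--
-- def name2seq(u, length):
--     s = u.lower().strip().replace(" ", "")[:length].strip()
--     d = "URDL"[(ord(s[0]) - ord('a')) // 7]
--     out = [d]
--     for c in s[1:]:
--         d = _step(d, c)
--         out.append(d)
--     return out
-- ===== Notes on version B (the rewrite author's own statement) =====
-- stated objective: alternative
-- what changed: A carries an integer state updated with mod-4 arithmetic and indexes the codes table at every step; B carries the direction LETTER itself as the state of a symbolic state machine, advancing it through a successor dict ROT by each letter's quarter-turn count, so no integer state or per-step table indexing remains.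
import Mathlib
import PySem

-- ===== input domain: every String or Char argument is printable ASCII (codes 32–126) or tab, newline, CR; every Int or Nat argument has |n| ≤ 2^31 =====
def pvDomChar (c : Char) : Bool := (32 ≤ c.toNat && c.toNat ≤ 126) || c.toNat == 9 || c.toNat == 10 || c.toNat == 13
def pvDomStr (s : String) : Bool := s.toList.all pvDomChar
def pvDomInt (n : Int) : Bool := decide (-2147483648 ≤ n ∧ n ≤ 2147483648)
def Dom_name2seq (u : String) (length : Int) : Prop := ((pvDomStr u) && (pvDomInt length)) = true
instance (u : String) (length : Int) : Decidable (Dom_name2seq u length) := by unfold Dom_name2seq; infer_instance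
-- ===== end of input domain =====

-- B replaces A's integer mod-4 state and per-step codes-table indexing by a symbolic state
-- machine: the carried state is the direction letter itself, advanced through a successor dict
-- by the letter's quarter-turn count (alternative decomposition/data structure; same cost).

-- codes = ["U","R","D","L"]
def pvCodes : List String := ["U", "R", "D", "L"]

-- ===== PORT A =====
-- literal transliteration of A: process the string, seed prev from the first char ( //7 ),
-- then a loop carrying (prev, out), appending codes[prev] with prev updated mod 4 each step.
def name2seq (u : String) (length : Int) : List String :=
  -- u = u.lower().strip().replace(" ", "")[:length]
  let u1 : List Char :=
    PySem.Chars.slice (PySem.Chars.replace (PySem.Chars.strip (PySem.Chars.lower u.toList)) [' '] []) none (some length)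
  -- prev = (ord(u.lower().strip()[0]) - ord('a')) // 7   (pyGetD is total under Pre_)
  let prev : Int :=
    PySem.Int.floordiv (((PySem.List.pyGetD (PySem.Chars.strip (PySem.Chars.lower u1)) 0 'a').toNat : Int) - 97) 7
  -- out = [codes[prev]]
  -- for letter in u.lower().strip()[1:]: prev = (prev + (ord(letter)-ord('a'))//9 + 3) % 4; out.append(codes[prev])
  (List.foldl
    (fun (st : Int × List String) letter =>
      (PySem.Int.mod (st.1 + PySem.Int.floordiv (((letter.toNat : Int)) - 97) 9 + 3) 4,
       st.2 ++ [PySem.List.pyGetD pvCodes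
         (PySem.Int.mod (st.1 + PySem.Int.floordiv (((letter.toNat : Int)) - 97) 9 + 3) 4) ""]))
    (prev, [PySem.List.pyGetD pvCodes prev ""])
    (PySem.Chars.slice (PySem.Chars.strip (PySem.Chars.lower u1)) (some 1) none)).2

-- ===== PORT B =====
-- ROT = {"U": "R", "R": "D", "D": "L", "L": "U"}
def pvROT : PySem.Dict String String :=
  PySem.Dict.ofList [("U", "R"), ("R", "D"), ("D", "L"), ("L", "U")]

-- _step(d, c): rotate the direction symbol ((ord(c)-97)//9+3) % 4 times through ROT.
-- (ROT[d] cannot miss: d is always one of the four keys; getD's default is never used.)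
def pvStep (d : String) (c : Char) : String :=
  (PySem.List.pyRange 0 (PySem.Int.mod (PySem.Int.floordiv ((c.toNat : Int) - 97) 9 + 3) 4) 1).foldl
    (fun d _ => PySem.Dict.getD pvROT d "") d

-- literal transliteration of B: trimmed string, first direction from "URDL", then a loop
-- carrying the direction LETTER (no integer state), advanced by pvStep.
def name2seq_alt (u : String) (length : Int) : List String :=
  -- s = u.lower().strip().replace(" ", "")[:length].strip()
  let s : List Char :=
    PySem.Chars.strip (PySem.Chars.slice (PySem.Chars.replace (PySem.Chars.strip (PySem.Chars.lower u.toList)) [' '] []) none (some length))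
  -- d = "URDL"[(ord(s[0]) - ord('a')) // 7]   (string index; default unreachable under Pre_)
  let d0 : String :=
    String.ofList [PySem.List.pyGetD ['U','R','D','L']
      (PySem.Int.floordiv (((PySem.List.pyGetD s 0 'a').toNat : Int) - 97) 7) 'U']
  -- out = [d]; for c in s[1:]: d = _step(d, c); out.append(d)
  (List.foldl
    (fun (st : String × List String) c =>
      let nd := pvStep st.1 c
      (nd, st.2 ++ [nd]))
    (d0, [d0]) (PySem.Chars.slice s (some 1) none)).2

-- ===== PRECONDITION & SPEC =====
-- Pre_ admits exactly the inputs on which A returns: the trimmed string must be nonempty (else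
-- u[0] raises IndexError) and its first character's code must lie in [69,124], so that the
-- un-modded first index (code-97)//7 lies in [-4,3] and codes[prev] does not raise IndexError.
def Pre_name2seq (u : String) (length : Int) : Prop :=
  PySem.Chars.strip (PySem.Chars.slice (PySem.Chars.replace (PySem.Chars.strip (PySem.Chars.lower u.toList)) [' '] []) none (some length)) ≠ [] ∧
  69 ≤ ((PySem.Chars.strip (PySem.Chars.slice (PySem.Chars.replace (PySem.Chars.strip (PySem.Chars.lower u.toList)) [' '] []) none (some length))).headD 'a').toNat ∧
  ((PySem.Chars.strip (PySem.Chars.slice (PySem.Chars.replace (PySem.Chars.strip (PySem.Chars.lower u.toList)) [' '] []) none (some length))).headD 'a').toNat ≤ 124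

instance (u : String) (length : Int) : Decidable (Pre_name2seq u length) := by
  unfold Pre_name2seq; infer_instance

def pvWitness_name2seq : String × Int := ("Mars Base", 6)

def Spec_name2seq (u : String) (length : Int) (out : List String) : Prop := out = name2seq_alt u length
instance (u : String) (length : Int) (out : List String) : Decidable (Spec_name2seq u length out) := by
  unfold Spec_name2seq; infer_instance

-- ===== CLAIM (what is proved, stated in full; the proofs are below) =====
def Claim_equal_name2seq : Prop := ∀ (u : String) (length : Int), Dom_name2seq u length → Pre_name2seq u length → Spec_name2seq u length (name2seq u length)

-- ===== LEMMAS AND PROOFS =====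

-- Python's Char order read on code points
theorem pv_char_le_iff (a b : Char) : a ≤ b ↔ a.toNat ≤ b.toNat := by
  rw [Char.le_def, UInt32.le_iff_toNat_le]
  exact Iff.rfl

theorem pv_isupper_iff (c : Char) : PySem.Chars.isupper c = true ↔ 65 ≤ c.toNat ∧ c.toNat ≤ 90 := by
  unfold PySem.Chars.isupper
  simp only [Bool.and_eq_true, decide_eq_true_eq, pv_char_le_iff]
  rw [show ('A').toNat = 65 from rfl, show ('Z').toNat = 90 from rfl]

-- a lowered character is fixed by lowering again
theorem pv_lowerChar_idem (c : Char) :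
    PySem.Chars.lowerChar (PySem.Chars.lowerChar c) = PySem.Chars.lowerChar c := by
  unfold PySem.Chars.lowerChar
  by_cases h : PySem.Chars.isupper c = true
  · rw [if_pos h]
    rw [pv_isupper_iff] at h
    have ht : (Char.ofNat (c.toNat + 32)).toNat = c.toNat + 32 := by
      rw [Char.toNat_ofNat, if_pos (Or.inl (by omega))]
    have hnotup : ¬ PySem.Chars.isupper (Char.ofNat (c.toNat + 32)) = true := by
      rw [pv_isupper_iff, ht]; omega
    rw [if_neg hnotup]
  · simp [h]

theorem pv_lower_fix {cs : List Char} (h : ∀ c ∈ cs, PySem.Chars.lowerChar c = c) :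
    PySem.Chars.lower cs = cs := by
  show cs.map PySem.Chars.lowerChar = cs
  rw [List.map_congr_left h]
  simp

-- membership through replace(" ", "") : characters come from the original string
theorem pv_mem_go (x : Char) : ∀ (fuel : Nat) (l acc : List Char),
    x ∈ PySem.Chars.replace.go [' '] [] fuel l acc → x ∈ acc ∨ x ∈ l := by
  intro fuel
  induction fuel with
  | zero =>
    intro l acc h
    simp only [PySem.Chars.replace.go, List.mem_append, List.mem_reverse] at h
    exact h
  | succ n ih =>
    intro l acc h
    cases l with
    | nil =>
      simp only [PySem.Chars.replace.go, List.mem_reverse] at h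
      exact Or.inl h
    | cons c t =>
      rw [show PySem.Chars.replace.go [' '] [] (n+1) (c :: t) acc =
          (if [' '].isPrefixOf (c :: t) = true then
            PySem.Chars.replace.go [' '] [] n (List.drop [' '].length (c :: t)) (List.reverse [] ++ acc)
          else PySem.Chars.replace.go [' '] [] n t (c :: acc)) from rfl] at h
      split at h
      · rcases ih _ _ h with h1 | h1
        · exact Or.inl (by simpa using h1)
        · exact Or.inr (List.mem_of_mem_drop h1)
      · rcases ih _ _ h with h1 | h1
        · rcases List.mem_cons.mp h1 with h2 | h2
          · exact Or.inr (by simp [h2])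
          · exact Or.inl h2
        · exact Or.inr (List.mem_cons_of_mem _ h1)

theorem pv_mem_replace_empty {x : Char} {xs : List Char}
    (h : x ∈ PySem.Chars.replace xs [' '] []) : x ∈ xs := by
  unfold PySem.Chars.replace at h
  rw [if_neg (by decide)] at h
  rcases pv_mem_go x xs.length xs [] h with h1 | h1
  · simp at h1
  · exact h1

theorem pv_mem_strip {x : Char} {xs : List Char} (h : x ∈ PySem.Chars.strip xs) : x ∈ xs := by
  unfold PySem.Chars.strip PySem.Chars.rstrip PySem.Chars.lstrip at h
  rw [List.mem_reverse] at h
  have h2 := (List.dropWhile_sublist _).mem h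
  rw [List.mem_reverse] at h2
  exact (List.dropWhile_sublist _).mem h2

-- rotating codes[a] b times through ROT lands on codes[(a+b) % 4]  (0 ≤ a,b < 4)
theorem pv_rot_count (b : Int) (hb0 : 0 ≤ b) (hb1 : b < 4) (a : Int) (ha0 : 0 ≤ a) (ha1 : a < 4) :
    (PySem.List.pyRange 0 b 1).foldl (fun d _ => PySem.Dict.getD pvROT d "")
        (PySem.List.pyGetD pvCodes a "")
      = PySem.List.pyGetD pvCodes (PySem.Int.mod (a + b) 4) "" := by
  interval_cases b <;> interval_cases a <;> decide

-- B's symbolic step tracks A's arithmetic step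
theorem pv_step_codes (p : Int) (c : Char) :
    pvStep (PySem.List.pyGetD pvCodes (PySem.Int.mod p 4) "") c
      = PySem.List.pyGetD pvCodes
          (PySem.Int.mod (p + PySem.Int.floordiv (((c.toNat : Int)) - 97) 9 + 3) 4) "" := by
  have e4 : (0 : Int) < 4 := by norm_num
  set f : Int := PySem.Int.floordiv (((c.toNat : Int)) - 97) 9 with hf
  unfold pvStep
  rw [pv_rot_count _ (PySem.Int.mod_nonneg _ e4) (PySem.Int.mod_lt _ e4)
        _ (PySem.Int.mod_nonneg _ e4) (PySem.Int.mod_lt _ e4)]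
  congr 1
  simp only [PySem.Int.mod_eq_emod_of_pos e4]
  omega

-- the two loops agree: A's (int state, out) fold versus B's (direction letter, out) fold
theorem pv_loop (cs : List Char) : ∀ (p : Int) (d : String) (acc : List String),
    d = PySem.List.pyGetD pvCodes (PySem.Int.mod p 4) "" →
    (List.foldl
      (fun (st : Int × List String) letter =>
        (PySem.Int.mod (st.1 + PySem.Int.floordiv (((letter.toNat : Int)) - 97) 9 + 3) 4,
         st.2 ++ [PySem.List.pyGetD pvCodes
           (PySem.Int.mod (st.1 + PySem.Int.floordiv (((letter.toNat : Int)) - 97) 9 + 3) 4) ""]))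
      (p, acc) cs).2
    = (List.foldl
        (fun (st : String × List String) c =>
          let nd := pvStep st.1 c
          (nd, st.2 ++ [nd]))
        (d, acc) cs).2 := by
  induction cs with
  | nil => intro p d acc _; rfl
  | cons c cs ih =>
    intro p d acc hd
    have e4 : (0 : Int) < 4 := by norm_num
    simp only [List.foldl_cons]
    set q : Int := PySem.Int.mod (p + PySem.Int.floordiv (((c.toNat : Int)) - 97) 9 + 3) 4 with hq
    have hstep : pvStep d c = PySem.List.pyGetD pvCodes q "" := by
      rw [hd, pv_step_codes]
    have hmodq : PySem.Int.mod q 4 = q := by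
      simp only [hq, PySem.Int.mod_eq_emod_of_pos e4]; omega
    rw [ih q (pvStep d c) (acc ++ [PySem.List.pyGetD pvCodes q ""]) (by rw [hstep, hmodq])]
    simp [hstep]

-- the first element: "URDL"[p0] as a 1-char string equals codes[p0], and mod-4 reduction is free
theorem pv_first (p0 : Int) (h1 : -4 ≤ p0) (h2 : p0 ≤ 3) :
    String.ofList [PySem.List.pyGetD ['U','R','D','L'] p0 'U'] = PySem.List.pyGetD pvCodes p0 ""
      ∧ PySem.List.pyGetD pvCodes p0 "" = PySem.List.pyGetD pvCodes (PySem.Int.mod p0 4) "" := by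
  interval_cases p0 <;> exact ⟨by decide, by decide⟩

-- ===== VERDICT (by name: the statement is the Claim_ definition above) =====
theorem name2seq_spec : Claim_equal_name2seq := by
  intro u length _ hpre
  obtain ⟨hne, hlo, hhi⟩ := hpre
  unfold Spec_name2seq
  simp only [name2seq, name2seq_alt]
  have hfix : ∀ c ∈ PySem.Chars.slice (PySem.Chars.replace (PySem.Chars.strip (PySem.Chars.lower u.toList)) [' '] []) none (some length),
      PySem.Chars.lowerChar c = c := by
    intro c hc
    rw [PySem.Chars.slice_eq_listSlice] at hc
    have hc1 := PySem.List.mem_of_mem_slice _ _ _ hc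
    have hc2 := pv_mem_replace_empty hc1
    have hc3 := pv_mem_strip hc2
    rcases List.mem_map.mp hc3 with ⟨c0, _, hc0⟩
    rw [← hc0, pv_lowerChar_idem]
  have hlow := pv_lower_fix hfix
  rw [hlow]
  cases hT : PySem.Chars.strip (PySem.Chars.slice (PySem.Chars.replace (PySem.Chars.strip (PySem.Chars.lower u.toList)) [' '] []) none (some length)) with
  | nil => exact absurd hT hne
  | cons c rest =>
    rw [hT] at hlo hhi
    simp only [List.headD_cons] at hlo hhi
    rw [PySem.List.pyGetD_zero_cons]
    rw [show PySem.Chars.slice (c :: rest) (some 1) none = rest from by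
      simp [PySem.Chars.slice_eq_listSlice, PySem.List.slice_from_one]]
    set p0 : Int := PySem.Int.floordiv (((c.toNat : Int)) - 97) 7 with hp0
    have hb1 : -4 ≤ p0 := by
      rw [hp0, PySem.Int.le_floordiv_iff_mul_le (by norm_num : (0:Int) < 7)]
      omega
    have hb2 : p0 < 4 := by
      rw [hp0, PySem.Int.floordiv_lt_iff_lt_mul (by norm_num : (0:Int) < 7)]
      omega
    obtain ⟨hfa, hfb⟩ := pv_first p0 hb1 (by omega)
    rw [pv_loop rest p0 (PySem.List.pyGetD pvCodes p0 "") _ hfb, hfa]
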